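-- pv_equiv track=rewrite | github.com/Justin21523/edge-deid-studio | scripts/benchmark_pipeline.py | synthetic_text
-- ===== SOURCE A (Python) =====
-- def synthetic_text(chars: int) -> str:
--     base = (
--         "ID A123456789 and phone 0912345678. "
--         "Email test@example.com. Address \u53f0\u5317\u5e02\u4fe1\u7fa9\u8def1\u865f. "
--     )
--     chunks = []
--     while sum(len(c) for c in chunks) < chars:
--         chunks.append(base)
--     return "".join(chunks)[:chars]
-- ===== SOURCE B (Python) =====
-- def synthetic_text(chars: int) -> str:
--     base = (
--         "ID A123456789 and phone 0912345678. "
--         "Email test@example.com. Address \u53f0\u5317\u5e02\u4fe1\u7fa9\u8def1\u865f. "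
--     )
--     n = -(-chars // len(base))  # ceil(chars / len(base)); <= 0 when chars <= 0
--     return (base * n)[:chars]
-- ===== Notes on version B (the rewrite author's own statement) =====
-- stated objective: faster
-- what changed: Replaces the append-and-resum loop (which re-sums all chunk lengths every iteration) with a closed-form repeat count n = ceil(chars/len(base)) and a single string multiplication plus one slice.
import Mathlib
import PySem

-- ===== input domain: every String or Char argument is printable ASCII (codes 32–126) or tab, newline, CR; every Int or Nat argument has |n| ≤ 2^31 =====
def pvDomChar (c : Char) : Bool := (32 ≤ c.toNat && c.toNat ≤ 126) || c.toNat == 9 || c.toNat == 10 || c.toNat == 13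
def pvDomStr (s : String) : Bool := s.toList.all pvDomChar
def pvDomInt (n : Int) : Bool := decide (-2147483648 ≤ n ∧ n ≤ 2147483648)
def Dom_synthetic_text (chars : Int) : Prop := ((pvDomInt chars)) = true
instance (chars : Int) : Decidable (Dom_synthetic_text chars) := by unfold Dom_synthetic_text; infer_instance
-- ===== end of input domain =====

-- B replaces A's append-and-resum loop by a closed-form repeat count (ceil division) and one slice; same return value.

-- ===== PORT A =====
def pvBase : String := "ID A123456789 and phone 0912345678. Email test@example.com. Address 台北市信義路1號. "

-- sum(len(c) for c in chunks)
def pvSumLen (chunks : List String) : Int := (chunks.map (fun c => PySem.Str.len c)).sum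

theorem pvSumLen_append (chunks : List String) :
    pvSumLen (chunks ++ [pvBase]) = pvSumLen chunks + 78 := by
  simp [pvSumLen]
  decide

-- the while loop: append base while the running sum of lengths is < chars
def pvLoopA (chars : Int) (chunks : List String) : List String :=
  if pvSumLen chunks < chars then pvLoopA chars (chunks ++ [pvBase]) else chunks
termination_by (chars - pvSumLen chunks).toNat
decreasing_by
  rw [pvSumLen_append]; omega

def synthetic_text (chars : Int) : String :=
  PySem.Str.slice (PySem.Str.join "" (pvLoopA chars [])) none (some chars)

-- ===== PORT B =====
def pvBaseAlt : String := "ID A123456789 and phone 0912345678. Email test@example.com. Address 台北市信義路1號. "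

-- n = -(-chars // len(base)), the ceil-division repeat count
def pvRepeatCount (chars : Int) : Int := -(PySem.Int.floordiv (-chars) (PySem.Str.len pvBaseAlt))

def synthetic_text_alt (chars : Int) : String :=
  -- base * n : Python string repetition; exact — n ≤ 0 yields "" just as in Python
  PySem.Str.slice (PySem.Str.join "" (List.replicate (pvRepeatCount chars).toNat pvBaseAlt)) none (some chars)

-- ===== PRECONDITION & SPEC =====
def Spec_synthetic_text (chars : Int) (out : String) : Prop := out = synthetic_text_alt chars
instance (chars : Int) (out : String) : Decidable (Spec_synthetic_text chars out) := by unfold Spec_synthetic_text; infer_instance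

-- ===== CLAIM (what is proved, stated in full; the proofs are below) =====
def Claim_equal_synthetic_text : Prop := ∀ (chars : Int), Dom_synthetic_text chars → Spec_synthetic_text chars (synthetic_text chars)

-- ===== LEMMAS AND PROOFS =====

theorem pvBaseAlt_eq : pvBaseAlt = pvBase := rfl

theorem pvLen_base : PySem.Str.len pvBase = 78 := by decide

theorem pvBase_toList_length : pvBase.toList.length = 78 := by decide

theorem pvSumLen_replicate (m : Nat) : pvSumLen (List.replicate m pvBase) = 78 * m := by
  induction m with
  | zero => simp [pvSumLen]
  | succ k ih =>
    rw [List.replicate_succ', pvSumLen_append, ih]; push_cast; ring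

theorem pvLoopA_spec (chars : Int) :
    ∀ (d m : Nat), (chars - 78 * m).toNat ≤ d →
      ∃ M : Nat, pvLoopA chars (List.replicate m pvBase) = List.replicate M pvBase ∧ chars ≤ 78 * M := by
  intro d
  induction d with
  | zero =>
    intro m hm
    rw [pvLoopA]
    rw [pvSumLen_replicate]
    have : ¬ (78 * (m : Int) < chars) := by omega
    simp only [this, if_false]
    exact ⟨m, rfl, by omega⟩
  | succ d ih =>
    intro m hm
    rw [pvLoopA, pvSumLen_replicate]
    by_cases h : 78 * (m : Int) < chars
    · simp only [h, if_true]
      rw [← List.replicate_succ']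
      have := ih (m + 1) (by push_cast; omega)
      simpa using this
    · simp only [h, if_false]
      exact ⟨m, rfl, by omega⟩

theorem pvJoin_nil_intercalate (l : List (List Char)) : List.intercalate [] l = l.flatten := by
  induction l with
  | nil => simp [List.intercalate]
  | cons a t ih => cases t <;> simp_all [List.intercalate, List.intersperse]

theorem pvLen_flatten_replicate (bl : List Char) (m : Nat) :
    (List.flatten (List.replicate m bl)).length = m * bl.length := by
  induction m with
  | zero => simp
  | succ k ih => rw [List.replicate_succ, List.flatten_cons, List.length_append, ih]; ring

theorem pvTake_agree (bl : List Char) (c m n : Nat) (hm : c ≤ m * bl.length) (hmn : m ≤ n) :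
    (List.flatten (List.replicate n bl)).take c = (List.flatten (List.replicate m bl)).take c := by
  obtain ⟨j, rfl⟩ := Nat.exists_eq_add_of_le hmn
  rw [List.replicate_add, List.flatten_append, List.take_append, pvLen_flatten_replicate]
  have : c - m * bl.length = 0 := by omega
  rw [this]
  simp

theorem pvTake_agree' (bl : List Char) (c m n : Nat) (hm : c ≤ m * bl.length)
    (hn : c ≤ n * bl.length) :
    (List.flatten (List.replicate m bl)).take c = (List.flatten (List.replicate n bl)).take c := by
  rcases le_total m n with h | h
  · rw [pvTake_agree bl c m n hm h]
  · rw [pvTake_agree bl c n m hn h]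

theorem pvSlice_join_replicate (chars : Int) (hc : 0 ≤ chars) (m : Nat) :
    (PySem.Str.slice (PySem.Str.join "" (List.replicate m pvBase)) none (some chars)).toList
      = (List.flatten (List.replicate m pvBase.toList)).take chars.toNat := by
  simp only [PySem.Str.toList_slice, PySem.Chars.slice_eq_listSlice, PySem.Str.toList_join,
    PySem.List.slice_to _ hc]
  congr 1
  rw [List.map_replicate]
  exact pvJoin_nil_intercalate _

theorem synthetic_text_spec' (chars : Int) :
    synthetic_text chars = synthetic_text_alt chars := by
  unfold synthetic_text synthetic_text_alt pvRepeatCount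
  rw [pvBaseAlt_eq, pvLen_base]
  set q : Int := PySem.Int.floordiv (-chars) 78 with hq
  by_cases hc : 0 ≤ chars
  · have hq78 : q * 78 ≤ -chars := by
      rw [hq]
      exact (PySem.Int.le_floordiv_iff_mul_le (by omega)).mp le_rfl
    obtain ⟨M, hM, hMc⟩ := pvLoopA_spec chars (chars - 0).toNat 0 (by omega)
    simp only [List.replicate_zero] at hM
    rw [hM]
    apply String.toList_inj.mp
    rw [pvSlice_join_replicate chars hc M, pvSlice_join_replicate chars hc _]
    apply pvTake_agree' <;> rw [pvBase_toList_length] <;> omega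
  · -- chars < 0: the loop body never runs and the repeat count is ≤ 0
    have hq0 : 0 ≤ q := by
      rw [hq]
      exact (PySem.Int.le_floordiv_iff_mul_le (by omega)).mpr (by omega)
    have h0 : ¬ (pvSumLen [] < chars) := by simp [pvSumLen]; omega
    have hn : (-q).toNat = 0 := by omega
    rw [pvLoopA, if_neg h0, hn, List.replicate_zero]

-- ===== VERDICT (by name: the statement is the Claim_ definition above) =====
theorem synthetic_text_spec : Claim_equal_synthetic_text := by
  intro chars _
  exact synthetic_text_spec' chars
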